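-- pv_equiv track=rewrite | github.com/arnavthestud/group9llm | evaluation_agent.py | parse_llm_scores
-- ===== SOURCE A (Python) =====
-- from typing import List, Dict, Union
--
-- def parse_llm_scores(llm_response: str) -> List[int]:
--     """Parse LLM-generated scores from response text."""
--     dimensions = ['Content Accuracy', 'Comprehension', 'Clarity of Expression', 'Language Mechanics']
--     scores = []
--
--     for dim in dimensions:
--         try:
--             # More robust score extraction
--             score_line = [line for line in llm_response.split('\n') if dim in line][0]
--             score = int(score_line.split(':')[1].split('/')[0].strip())
--             scores.append(score)
--         except (IndexError, ValueError):
--             # Fallback to median score if parsing fails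
--             scores.append(3)
--
--     return scores
-- ===== SOURCE B (Python) =====
-- def _score_from(line):
--     """Parse one stored line (or None for a missing dimension)."""
--     if line is None:
--         return 3
--     try:
--         return int(line.split(':')[1].split('/')[0].strip())
--     except (IndexError, ValueError):
--         return 3
--
--
-- def parse_llm_scores(llm_response):
--     """Parse LLM-generated scores: one pass over the lines builds a
--     first-occurrence-wins dimension->line index, then each dimension is parsed
--     from its stored line."""
--     dimensions = ['Content Accuracy', 'Comprehension', 'Clarity of Expression', 'Language Mechanics']
--     index = {}
--     for line in llm_response.split('\n'):
--         for dim in dimensions: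
--             if dim not in index and dim in line:
--                 index[dim] = line
--     scores = []
--     for dim in dimensions:
--         scores.append(_score_from(index.get(dim)))
--     return scores
-- ===== Notes on version B (the rewrite author's own statement) =====
-- stated objective: alternative
-- what changed: A scans the full line list once per dimension (four filter passes, each taking element [0]); B makes a single pass over the lines building a first-occurrence dict indexed by dimension, then parses the stored line per dimension.
import Mathlib
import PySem

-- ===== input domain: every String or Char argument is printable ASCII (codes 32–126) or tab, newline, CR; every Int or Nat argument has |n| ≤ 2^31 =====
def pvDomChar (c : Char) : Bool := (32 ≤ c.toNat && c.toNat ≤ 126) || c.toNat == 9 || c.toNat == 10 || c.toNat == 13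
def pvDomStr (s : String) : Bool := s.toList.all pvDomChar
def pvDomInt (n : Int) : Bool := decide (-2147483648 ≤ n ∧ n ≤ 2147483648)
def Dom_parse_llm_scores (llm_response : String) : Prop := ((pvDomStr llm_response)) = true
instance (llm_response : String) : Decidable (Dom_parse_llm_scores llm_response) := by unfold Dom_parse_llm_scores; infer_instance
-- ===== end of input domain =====

-- B replaces A's four full scans of the line list (one filter pass per dimension)
-- by a single pass building a first-occurrence dimension→line index; same results.

-- ===== PORT A =====
-- s.split(sep) with a fixed non-empty separator (split? is some there; getD is never the default)
def pvSplit (s sep : String) : List String := (PySem.Str.split? s sep).getD []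

-- A: for each dimension, scan ALL lines, take the first containing the dimension,
-- parse int(line.split(':')[1].split('/')[0].strip()); IndexError/ValueError → 3.
def parse_llm_scores (llm_response : String) : List Int :=
  let dimensions := ["Content Accuracy", "Comprehension", "Clarity of Expression", "Language Mechanics"]
  dimensions.foldl (fun scores dim =>
    scores ++ [
      match (pvSplit llm_response "\n").filter (fun line => PySem.Str.isIn dim line) with
      | [] => (3 : Int)                -- [0] on empty list: IndexError → except branch
      | score_line :: _ =>
        match PySem.List.pyGet? (pvSplit score_line ":") 1 with
        | none => (3 : Int)            -- split(':')[1]: IndexError → except branch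
        | some part =>
          match PySem.Int.ofStr? (PySem.Str.strip ((pvSplit part "/").headD "")) with
          | none => (3 : Int)          -- int(...): ValueError → except branch
          | some score => score]) []

-- ===== PORT B =====
-- Source B's _score_from: parse one stored line (none = missing dimension).
def pvScoreFrom (line? : Option String) : Int :=
  match line? with
  | none => 3
  | some line =>
    match PySem.List.pyGet? (pvSplit line ":") 1 with
    | none => 3
    | some part =>
      match PySem.Int.ofStr? (PySem.Str.strip ((pvSplit part "/").headD "")) with
      | none => 3
      | some score => score

-- Source B's index build: one pass over the lines, first occurrence per dimension wins.
def pvBuildIndex (lines : List String) (dims : List String) : PySem.Dict String String :=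
  lines.foldl (fun idx line =>
    dims.foldl (fun idx dim =>
      if !(idx.contains dim) && PySem.Str.isIn dim line then idx.insert dim line else idx)
      idx) PySem.Dict.empty

def parse_llm_scores_alt (llm_response : String) : List Int :=
  let dimensions := ["Content Accuracy", "Comprehension", "Clarity of Expression", "Language Mechanics"]
  let index := pvBuildIndex (pvSplit llm_response "\n") dimensions
  dimensions.foldl (fun scores dim => scores ++ [pvScoreFrom (index.get? dim)]) []

-- ===== PRECONDITION & SPEC =====
def Spec_parse_llm_scores (llm_response : String) (out : List Int) : Prop := out = parse_llm_scores_alt llm_response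
instance (llm_response : String) (out : List Int) : Decidable (Spec_parse_llm_scores llm_response out) := by unfold Spec_parse_llm_scores; infer_instance

-- ===== CLAIM (what is proved, stated in full; the proofs are below) =====
def Claim_equal_parse_llm_scores : Prop := ∀ (llm_response : String), Dom_parse_llm_scores llm_response → Spec_parse_llm_scores llm_response (parse_llm_scores llm_response)

-- ===== LEMMAS AND PROOFS =====

-- A fold over keys not containing dim never changes the lookup at dim.
lemma pv_inner_not_mem (ks : List String) (d : PySem.Dict String String) (line dim : String)
    (h : dim ∉ ks) :
    (ks.foldl (fun idx k =>
      if !(idx.contains k) && PySem.Str.isIn k line then idx.insert k line else idx) d).get? dim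
    = d.get? dim := by
  induction ks generalizing d with
  | nil => rfl
  | cons k ks ih =>
    simp only [List.mem_cons, not_or] at h
    simp only [List.foldl_cons]
    rw [ih _ h.2]
    split
    · exact PySem.Dict.get?_insert_of_ne _ _ h.1
    · rfl

-- One line's inner fold over distinct keys: at dim ∈ ks, the lookup becomes
-- the old value, or else this line if it contains dim.
lemma pv_inner_get? (ks : List String) (hnd : ks.Nodup) (d : PySem.Dict String String)
    (line dim : String) (h : dim ∈ ks) :
    (ks.foldl (fun idx k =>
      if !(idx.contains k) && PySem.Str.isIn k line then idx.insert k line else idx) d).get? dim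
    = (d.get? dim).or (if PySem.Str.isIn dim line then some line else none) := by
  induction ks generalizing d with
  | nil => cases h
  | cons k ks ih =>
    rcases List.nodup_cons.mp hnd with ⟨hk, hnd'⟩
    simp only [List.foldl_cons]
    rcases List.mem_cons.mp h with rfl | hmem
    · rw [pv_inner_not_mem ks _ line dim hk]
      rcases hc : d.contains dim with _ | _
      · have hnone : d.get? dim = none := by
          rw [PySem.Dict.get?_eq_none_iff_contains]; exact hc
        simp only [Bool.not_false, Bool.true_and, hnone, Option.none_or]
        split
        · next hin => simp [PySem.Dict.get?_insert_self]
        · next hin => simp [Bool.not_eq_true] at hin; simp [hnone]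
      · have := PySem.Dict.contains_eq_isSome_get? d dim
        rw [hc] at this
        rcases hg : d.get? dim with _ | v
        · rw [hg] at this; simp at this
        · simp [hg]
    · have hne : dim ≠ k := fun e => hk (e ▸ hmem)
      rw [ih hnd' _ hmem]
      split
      · rw [PySem.Dict.get?_insert_of_ne _ _ hne]
      · rfl

-- The whole index build: at dim ∈ ks, the lookup is the first line containing dim.
lemma pv_build_get? (lines : List String) (ks : List String) (hnd : ks.Nodup)
    (d : PySem.Dict String String) (dim : String) (h : dim ∈ ks) :
    (lines.foldl (fun idx line =>
      ks.foldl (fun idx k =>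
        if !(idx.contains k) && PySem.Str.isIn k line then idx.insert k line else idx) idx)
      d).get? dim
    = (d.get? dim).or ((lines.filter (fun l => PySem.Str.isIn dim l)).head?) := by
  induction lines generalizing d with
  | nil => simp
  | cons line lines ih =>
    simp only [List.foldl_cons, List.filter_cons]
    rw [ih _]
    rw [pv_inner_get? ks hnd d line dim h]
    rcases hin : PySem.Str.isIn dim line with _ | _
    · simp
    · simp

lemma pv_index_get? (llm_response dim : String)
    (h : dim ∈ ["Content Accuracy", "Comprehension", "Clarity of Expression", "Language Mechanics"]) :
    (pvBuildIndex (pvSplit llm_response "\n")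
      ["Content Accuracy", "Comprehension", "Clarity of Expression", "Language Mechanics"]).get? dim
    = ((pvSplit llm_response "\n").filter (fun l => PySem.Str.isIn dim l)).head? := by
  unfold pvBuildIndex
  rw [pv_build_get? _ _ (by decide) _ _ h]
  simp [PySem.Dict.get?_empty]

-- A's per-dimension match over the filtered list equals pvScoreFrom of its head?.
lemma pv_matchA_eq (l : List String) :
    (match l with
      | [] => (3 : Int)
      | score_line :: _ =>
        match PySem.List.pyGet? (pvSplit score_line ":") 1 with
        | none => (3 : Int)
        | some part =>
          match PySem.Int.ofStr? (PySem.Str.strip ((pvSplit part "/").headD "")) with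
          | none => (3 : Int)
          | some score => score)
    = pvScoreFrom l.head? := by
  cases l <;> rfl

-- ===== VERDICT (by name: the statement is the Claim_ definition above) =====
theorem parse_llm_scores_spec : Claim_equal_parse_llm_scores := by
  intro s _
  unfold Spec_parse_llm_scores parse_llm_scores parse_llm_scores_alt
  simp only [List.foldl_cons, List.foldl_nil, List.nil_append, List.cons_append, pv_matchA_eq,
    pv_index_get? s "Content Accuracy" (by decide),
    pv_index_get? s "Comprehension" (by decide),
    pv_index_get? s "Clarity of Expression" (by decide),
    pv_index_get? s "Language Mechanics" (by decide)]
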